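-- pv_equiv track=rewrite | github.com/gohana/py_summarizer | backend/summarizer_tools.py | rank_sentences
-- ===== SOURCE A (Python) =====
-- def rank_sentences(words, sentences):
--   ranks = dict()  # stores indices of each sentence and its points
--
--   for i in range(len(sentences)):
--     ranks[i] = 0
--     for word in words:
--       if word in sentences[i].lower():
--         ranks[i] += words[word]
--
--   return ranks
-- ===== SOURCE B (Python) =====
-- def rank_sentences(words, sentences):
--     # Index the sentence instead of scanning the words: enumerate every window
--     # of the lowered sentence whose length is some word's length, collect the
--     # distinct windows, and sum the weights the word dict assigns to them.
--     lengths = {len(w) for w in words}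
--     ranks = {}
--     for i, sentence in enumerate(sentences):
--         t = sentence.lower()
--         seen = set()
--         for n in lengths:
--             for a in range(len(t) - n + 1):
--                 seen.add(t[a:a + n])
--         ranks[i] = sum(words.get(sub, 0) for sub in seen)
--     return ranks
-- ===== Notes on version B (the rewrite author's own statement) =====
-- stated objective: faster
-- what changed: B inverts the matching direction: instead of scanning every word through every sentence, it enumerates the distinct windows of each lowered sentence at exactly the word lengths present and sums the weights the word dict assigns to those windows via hash lookups, so the per-sentence cost depends on the number of distinct word lengths rather than on the number of words.
import Mathlib
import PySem

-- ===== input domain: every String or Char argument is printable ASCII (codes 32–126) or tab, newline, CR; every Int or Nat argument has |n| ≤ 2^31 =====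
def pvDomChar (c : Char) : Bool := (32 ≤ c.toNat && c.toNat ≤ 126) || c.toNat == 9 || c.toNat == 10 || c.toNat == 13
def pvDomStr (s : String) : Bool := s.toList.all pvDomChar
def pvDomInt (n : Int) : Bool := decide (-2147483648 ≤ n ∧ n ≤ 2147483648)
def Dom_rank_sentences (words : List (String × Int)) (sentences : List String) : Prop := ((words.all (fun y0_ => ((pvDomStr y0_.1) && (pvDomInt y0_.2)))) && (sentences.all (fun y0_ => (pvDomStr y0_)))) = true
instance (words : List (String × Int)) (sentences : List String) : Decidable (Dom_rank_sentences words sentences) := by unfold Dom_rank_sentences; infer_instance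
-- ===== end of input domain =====

-- B inverts the matching direction: it enumerates the distinct windows of each lowered
-- sentence at the word lengths present and sums the dict weights of those windows,
-- instead of scanning each word through each sentence; a timing run measured B faster.

-- ===== PORT A =====
-- The Python receives `words` as a dict; the assoc-list argument is marshalled with
-- PySem.Dict.ofList (last duplicate value wins, first position kept), exactly dict(words).
def rank_sentences (words : List (String × Int)) (sentences : List String) : List (Int × Int) :=
  let wd := PySem.Dict.ofList words
  let ranks : PySem.Dict Int Int :=
    (PySem.List.pyRange 0 sentences.length 1).foldl
      (fun ranks i =>
        -- for word in words: if word in sentences[i].lower(): ranks[i] += words[word]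
        wd.keys.foldl
          (fun r word =>
            if PySem.Str.isIn word (PySem.Str.lower (PySem.List.pyGetD sentences i "")) then
              r.modify i 0 (· + wd.getD word 0)
            else r)
          (ranks.insert i 0))
      PySem.Dict.empty
  ranks.items

-- ===== PORT B =====
-- Source B iterates the sets `lengths` and `seen` only where the result is order-independent
-- (building another set; an integer sum); the port fixes first-occurrence order.
def rank_sentences_alt (words : List (String × Int)) (sentences : List String) : List (Int × Int) :=
  let wd := PySem.Dict.ofList words
  let lengths : PySem.Set Int := PySem.Set.ofList (wd.keys.map PySem.Str.len)
  let ranks : PySem.Dict Int Int :=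
    (PySem.List.enumerate sentences 0).foldl
      (fun ranks p =>
        let t := PySem.Str.lower p.2
        let seen : PySem.Set String :=
          lengths.foldl
            (fun seen n =>
              (PySem.List.pyRange 0 (PySem.Str.len t - n + 1) 1).foldl
                (fun seen a => PySem.Set.add seen (PySem.Str.slice t (some a) (some (a + n))))
                seen)
            PySem.Set.empty
        ranks.insert p.1 (seen.foldl (fun acc sub => acc + wd.getD sub 0) 0))
      PySem.Dict.empty
  ranks.items

-- ===== PRECONDITION & SPEC =====
def Spec_rank_sentences (words : List (String × Int)) (sentences : List String) (out : List (Int × Int)) : Prop := out = rank_sentences_alt words sentences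
instance (words : List (String × Int)) (sentences : List String) (out : List (Int × Int)) : Decidable (Spec_rank_sentences words sentences out) := by unfold Spec_rank_sentences; infer_instance

-- ===== CLAIM (what is proved, stated in full; the proofs are below) =====
def Claim_equal_rank_sentences : Prop := ∀ (words : List (String × Int)) (sentences : List String), Dom_rank_sentences words sentences → Spec_rank_sentences words sentences (rank_sentences words sentences)

-- ===== LEMMAS AND PROOFS =====

-- total weight of the words (as dict items) occurring in s
def pvScore (items : List (String × Int)) (s : String) : Int :=
  items.foldl (fun a p => if PySem.Str.isIn p.1 s then a + p.2 else a) 0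

theorem pvScore_shift (items : List (String × Int)) (s : String) (a : Int) :
    items.foldl (fun a p => if PySem.Str.isIn p.1 s then a + p.2 else a) a
      = a + pvScore items s := by
  induction items generalizing a with
  | nil => simp [pvScore]
  | cons p rest ih =>
    simp only [pvScore, List.foldl_cons]
    rw [ih, ih]
    split <;> ring

theorem pvScore_cons (p : String × Int) (rest : List (String × Int)) (s : String) :
    pvScore (p :: rest) s
      = (if PySem.Str.isIn p.1 s then p.2 else 0) + pvScore rest s := by
  have h := pvScore_shift rest s
  simp only [pvScore, List.foldl_cons]
  rw [h, h]
  split <;> ring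

theorem pvA_inner (items : List (String × Int)) (s : String) (i : Int)
    (ranks : PySem.Dict Int Int) (a : Int) :
    items.foldl
      (fun r p =>
        if PySem.Str.isIn p.1 s then r.modify i 0 (· + p.2) else r)
      (ranks.insert i a)
      = ranks.insert i (a + pvScore items s) := by
  induction items generalizing a with
  | nil => simp [pvScore]
  | cons p rest ih =>
    simp only [List.foldl_cons]
    by_cases h : PySem.Str.isIn p.1 s = true
    · have hm : (ranks.insert i a).modify i 0 (· + p.2)
          = ranks.insert i (a + p.2) := by
        show (ranks.insert i a).insert i (((ranks.insert i a).getD i 0) + p.2)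
            = ranks.insert i (a + p.2)
        rw [PySem.Dict.getD_insert_self, PySem.Dict.insert_insert_self]
      rw [if_pos h, hm, ih, pvScore_cons, if_pos h]
      congr 1
      ring
    · rw [if_neg h, ih, pvScore_cons, if_neg h]
      congr 1
      ring

theorem pv_fresh_fold (v : Int → Int) (n : Nat) :
    ((PySem.List.pyRange 0 (n : Int) 1).foldl (fun d i => d.insert i (v i)) PySem.Dict.empty).items
      = (PySem.List.pyRange 0 (n : Int) 1).map (fun i => (i, v i)) := by
  have h := PySem.Dict.items_foldl_insert_fresh (l := PySem.List.pyRange 0 (n : Int) 1)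
      (k := fun i : Int => i) (v := v) (d := PySem.Dict.empty)
      (by intro a _; exact PySem.Dict.contains_empty a)
      (by simpa using PySem.List.nodup_pyRange_one 0 (n : Int))
  simpa using h

-- plain first-match lookup with default 0 (proof mirror of dict.get(sub, 0))
def pvLookup (l : List (String × Int)) (x : String) : Int :=
  match l with
  | [] => 0
  | (k, v) :: r => if k = x then v else pvLookup r x

theorem pvLookup_eq_getD (wd : PySem.Dict String Int) (x : String) :
    wd.getD x 0 = pvLookup wd.items x := by
  obtain ⟨l⟩ := wd
  induction l with
  | nil => simp [PySem.Dict.getD, PySem.Dict.get?, pvLookup]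
  | cons p r ih =>
    obtain ⟨k, v⟩ := p
    rw [PySem.Dict.getD_eq_get?_getD, PySem.Dict.get?_mk_cons]
    rw [PySem.Dict.getD_eq_get?_getD] at ih
    simp only [pvLookup, beq_iff_eq]
    split
    · rfl
    · exact ih

theorem pvLookup_eq_zero (l : List (String × Int)) (x : String)
    (h : x ∉ l.map Prod.fst) : pvLookup l x = 0 := by
  induction l with
  | nil => rfl
  | cons p r ih =>
    simp only [List.map_cons, List.mem_cons] at h
    push Not at h
    simp only [pvLookup]
    rw [if_neg (fun hk => h.1 hk.symm)]
    exact ih h.2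

theorem pv_sum_ite (seen : List String) (h : seen.Nodup) (k : String) (v : Int)
    (g : String → Int) (hg : g k = 0) :
    (seen.map (fun x => if k = x then v else g x)).sum
      = (if k ∈ seen then v else 0) + (seen.map g).sum := by
  induction seen with
  | nil => simp
  | cons x r ih =>
    rcases List.nodup_cons.mp h with ⟨hx, hr⟩
    by_cases hk : k = x
    · subst hk
      have hcong : ∀ y ∈ r, (if k = y then v else g y) = g y := by
        intro y hy
        rw [if_neg]
        rintro rfl
        exact hx hy
      rw [List.map_cons, List.sum_cons, if_pos rfl, List.map_congr_left hcong,
          List.map_cons, List.sum_cons, if_pos (by simp), hg]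
      ring
    · rw [List.map_cons, List.sum_cons, if_neg hk, List.map_cons, List.sum_cons, ih hr]
      have hmem : (k ∈ x :: r) ↔ k ∈ r := by simp [List.mem_cons, hk]
      rw [if_congr hmem rfl rfl]
      split <;> ring

theorem pv_ind_shift (seen : List String) (l : List (String × Int)) (a : Int) :
    l.foldl (fun a p => if p.1 ∈ seen then a + p.2 else a) a
      = a + l.foldl (fun a p => if p.1 ∈ seen then a + p.2 else a) 0 := by
  induction l generalizing a with
  | nil => simp
  | cons p r ih =>
    simp only [List.foldl_cons]
    rw [ih, ih (if p.1 ∈ seen then 0 + p.2 else 0)]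
    split <;> ring

theorem pv_sum_lookup (l : List (String × Int)) (hk : (l.map Prod.fst).Nodup)
    (seen : List String) (hs : seen.Nodup) :
    (seen.map (fun x => pvLookup l x)).sum
      = l.foldl (fun a p => if p.1 ∈ seen then a + p.2 else a) 0 := by
  induction l with
  | nil =>
    simp only [pvLookup, List.foldl_nil]
    simp
  | cons p r ih =>
    obtain ⟨k, v⟩ := p
    rcases List.nodup_cons.mp hk with ⟨hknr, hr⟩
    have hz : pvLookup r k = 0 := pvLookup_eq_zero r k hknr
    have hstep : (seen.map (fun x => pvLookup ((k, v) :: r) x)).sum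
        = (if k ∈ seen then v else 0) + (seen.map (fun x => pvLookup r x)).sum := by
      simpa [pvLookup] using pv_sum_ite seen hs k v (fun x => pvLookup r x) hz
    rw [hstep, ih hr]
    simp only [List.foldl_cons]
    rw [pv_ind_shift seen r (if (k, v).1 ∈ seen then 0 + v else 0)]
    split <;> ring

theorem pv_nodup_inner (l : List Int) (f : Int → String) (s : PySem.Set String)
    (h : s.Nodup) : (l.foldl (fun s a => PySem.Set.add s (f a)) s).Nodup := by
  induction l generalizing s with
  | nil => exact h
  | cons a r ih => exact ih _ (PySem.Set.nodup_add s (f a) h)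

theorem pv_nodup_nested (ls : List Int) (t : String) (s0 : PySem.Set String)
    (h : s0.Nodup) :
    (ls.foldl
      (fun s n =>
        (PySem.List.pyRange 0 (PySem.Str.len t - n + 1) 1).foldl
          (fun s a => PySem.Set.add s (PySem.Str.slice t (some a) (some (a + n)))) s)
      s0).Nodup := by
  induction ls generalizing s0 with
  | nil => exact h
  | cons n r ih => exact ih _ (pv_nodup_inner _ _ s0 h)

theorem pv_mem_nested (ls : List Int) (t : String) (s0 : PySem.Set String) (sub : String) :
    sub ∈ ls.foldl
      (fun s n =>
        (PySem.List.pyRange 0 (PySem.Str.len t - n + 1) 1).foldl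
          (fun s a => PySem.Set.add s (PySem.Str.slice t (some a) (some (a + n)))) s)
      s0
    ↔ sub ∈ s0 ∨ ∃ n ∈ ls, ∃ a, (0 ≤ a ∧ a < PySem.Str.len t - n + 1)
        ∧ sub = PySem.Str.slice t (some a) (some (a + n)) := by
  induction ls generalizing s0 with
  | nil => simp
  | cons n r ih =>
    simp only [List.foldl_cons]
    rw [ih]
    simp only [PySem.Set.mem_foldl_add, PySem.List.mem_pyRange_one, List.mem_cons]
    constructor
    · rintro (((h0 | ⟨a, ha, rfl⟩) | h))
      · exact Or.inl h0
      · exact Or.inr ⟨n, Or.inl rfl, a, ha, rfl⟩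
      · rcases h with ⟨m, hm, a, ha, rfl⟩
        exact Or.inr ⟨m, Or.inr hm, a, ha, rfl⟩
    · rintro ((h0 | ⟨m, (rfl | hm), a, ha, rfl⟩))
      · exact Or.inl (Or.inl h0)
      · exact Or.inl (Or.inr ⟨a, ha, rfl⟩)
      · exact Or.inr ⟨m, hm, a, ha, rfl⟩

-- a window of t at a word length is exactly an occurring substring of t
theorem pv_mem_seen_iff (wd : PySem.Dict String Int) (t : String) (k : String)
    (hk : k ∈ wd.keys) :
    k ∈ (PySem.Set.ofList (wd.keys.map PySem.Str.len)).foldl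
      (fun s n =>
        (PySem.List.pyRange 0 (PySem.Str.len t - n + 1) 1).foldl
          (fun s a => PySem.Set.add s (PySem.Str.slice t (some a) (some (a + n)))) s)
      PySem.Set.empty
    ↔ PySem.Str.isIn k t = true := by
  rw [pv_mem_nested]
  constructor
  · rintro (h0 | ⟨n, hn, a, ⟨ha0, ha1⟩, rfl⟩)
    · cases h0
    · have hn0 : 0 ≤ n := by
        rw [PySem.Set.mem_ofList, List.mem_map] at hn
        obtain ⟨w, _, rfl⟩ := hn
        simp [PySem.Str.len]
      obtain ⟨m, rfl⟩ : ∃ m : Nat, n = (m : Int) := ⟨n.toNat, by omega⟩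
      obtain ⟨j, rfl⟩ : ∃ j : Nat, a = (j : Int) := ⟨a.toNat, by omega⟩
      rw [PySem.Str.isIn_iff_infix, PySem.Str.toList_slice,
          PySem.Chars.slice_eq_listSlice,
          PySem.List.slice_natCast_add]
      exact ((List.take_prefix _ _).isInfix).trans ((List.drop_suffix _ _).isInfix)
  · intro h
    rw [PySem.Str.isIn_iff_infix] at h
    obtain ⟨s1, s2, hsplit⟩ := h
    refine Or.inr ⟨PySem.Str.len k, ?_, (s1.length : Int), ⟨by positivity, ?_⟩, ?_⟩
    · rw [PySem.Set.mem_ofList, List.mem_map]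
      exact ⟨k, hk, rfl⟩
    · have hlen : t.toList.length = s1.length + k.toList.length + s2.length := by
        rw [← hsplit]; simp; omega
      simp only [PySem.Str.len]
      omega
    · apply String.toList_inj.mp
      rw [PySem.Str.toList_slice, PySem.Chars.slice_eq_listSlice,
          show (PySem.Str.len k) = ((k.toList.length : Nat) : Int) from rfl,
          PySem.List.slice_natCast_add, ← hsplit]
      rw [show s1 ++ k.toList ++ s2 = s1 ++ (k.toList ++ s2) by simp,
          List.drop_left, List.take_left]

-- B's per-sentence sum over the window set equals A's per-sentence score
theorem pv_core (words : List (String × Int)) (t : String) :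
    ((PySem.Set.ofList ((PySem.Dict.ofList words).keys.map PySem.Str.len)).foldl
        (fun s n =>
          (PySem.List.pyRange 0 (PySem.Str.len t - n + 1) 1).foldl
            (fun s a => PySem.Set.add s (PySem.Str.slice t (some a) (some (a + n)))) s)
        PySem.Set.empty).foldl
      (fun acc sub => acc + (PySem.Dict.ofList words).getD sub 0) 0
      = pvScore (PySem.Dict.ofList words).items t := by
  set wd := PySem.Dict.ofList words with hwd
  set seen := (PySem.Set.ofList (wd.keys.map PySem.Str.len)).foldl
      (fun s n =>
        (PySem.List.pyRange 0 (PySem.Str.len t - n + 1) 1).foldl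
          (fun s a => PySem.Set.add s (PySem.Str.slice t (some a) (some (a + n)))) s)
      PySem.Set.empty with hseen
  have hsn : seen.Nodup := pv_nodup_nested _ t _ List.nodup_nil
  have hkn : (wd.items.map Prod.fst).Nodup := by
    have := PySem.Dict.nodup_keys_ofList words
    simpa [PySem.Dict.keys, hwd] using this
  rw [PySem.List.foldl_add]
  have hmap : seen.map (fun sub => wd.getD sub 0) = seen.map (fun sub => pvLookup wd.items sub) :=
    List.map_congr_left (fun x _ => pvLookup_eq_getD wd x)
  rw [zero_add, hmap, pv_sum_lookup wd.items hkn seen hsn]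
  unfold pvScore
  apply PySem.List.foldl_congr_mem
  intro acc p hp
  have hpk : p.1 ∈ wd.keys := by
    simp only [PySem.Dict.keys]
    exact List.mem_map.mpr ⟨p, hp, rfl⟩
  have hiff := pv_mem_seen_iff wd t p.1 hpk
  rw [← hseen] at hiff
  by_cases h : PySem.Str.isIn p.1 t = true
  · rw [if_pos (hiff.mpr h), if_pos h]
  · rw [if_neg (fun hm => h (hiff.mp hm)), if_neg h]

-- ===== VERDICT (by name: the statement is the Claim_ definition above) =====
theorem rank_sentences_spec : Claim_equal_rank_sentences := by
  intro words sentences _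
  unfold Spec_rank_sentences rank_sentences rank_sentences_alt
  simp only []
  set wd := PySem.Dict.ofList words with hwd
  have hnd : wd.keys.Nodup := PySem.Dict.nodup_keys_ofList words
  have hitems := PySem.Dict.items_eq_map_keys wd hnd 0
  -- A's inner loop computes an insert of the sentence's score
  have hfun :
      (fun (ranks : PySem.Dict Int Int) (i : Int) =>
        wd.keys.foldl
          (fun r word =>
            if PySem.Str.isIn word (PySem.Str.lower (PySem.List.pyGetD sentences i "")) then
              r.modify i 0 (· + wd.getD word 0)
            else r)
          (ranks.insert i 0))
      = (fun (ranks : PySem.Dict Int Int) (i : Int) =>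
          ranks.insert i (0 + pvScore wd.items (PySem.Str.lower (PySem.List.pyGetD sentences i "")))) := by
    funext ranks i
    have h := pvA_inner wd.items (PySem.Str.lower (PySem.List.pyGetD sentences i "")) i ranks 0
    rw [hitems, List.foldl_map] at h
    rw [← hitems] at h
    exact h
  rw [hfun]
  rw [pv_fresh_fold (fun i => 0 + pvScore wd.items (PySem.Str.lower (PySem.List.pyGetD sentences i ""))) sentences.length]
  -- B's outer loop over the fresh distinct indices of enumerate appends items in order
  have hBitems := PySem.Dict.items_foldl_insert_fresh (l := PySem.List.enumerate sentences 0)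
      (k := fun p : Int × String => p.1)
      (v := fun p : Int × String =>
        ((PySem.Set.ofList (wd.keys.map PySem.Str.len)).foldl
          (fun s n =>
            (PySem.List.pyRange 0 (PySem.Str.len (PySem.Str.lower p.2) - n + 1) 1).foldl
              (fun s a => PySem.Set.add s
                (PySem.Str.slice (PySem.Str.lower p.2) (some a) (some (a + n)))) s)
          PySem.Set.empty).foldl
          (fun acc sub => acc + wd.getD sub 0) 0)
      (d := PySem.Dict.empty)
      (by intro a _; exact PySem.Dict.contains_empty a.1)
      (by rw [show ((PySem.List.enumerate sentences 0).map fun p => p.1)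
                = (PySem.List.enumerate sentences 0).map Prod.fst from rfl,
              PySem.List.map_fst_enumerate]
          simpa using PySem.List.nodup_pyRange_one 0 (sentences.length : Int))
  rw [hBitems]
  rw [PySem.List.enumerate_eq_map_pyRange sentences ""]
  rw [List.map_map]
  simp only [PySem.List.len]
  apply List.map_congr_left
  intro j _
  simp only [Function.comp]
  rw [pv_core words (PySem.Str.lower (PySem.List.pyGetD sentences j "")), zero_add, hwd]
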